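-- pv_equiv track=rewrite | github.com/TimeB1729/codeforces | cantors_diag.py | cantors_diag
-- ===== SOURCE A (Python) =====
-- def cantors_diag(n = 4):
--     matrix = [[0 for _ in range(n)] for _ in range(n)]
--     init = 1
--     for k in range(2*n - 1):
--         if k%2 == 0:
--             i = min(k, n-1)
--             j = k - i
--             while i >= 0 and j < n:
--                 matrix[i][j] = init
--                 init += 1
--                 i -= 1
--                 j += 1
--         else:
--             j = min(k, n-1)
--             i = k - j
--             while j >= 0 and i < n:
--                 matrix[i][j] = init
--                 init += 1
--                 i += 1
--                 j -= 1
--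
--     return matrix
-- ===== SOURCE B (Python) =====
-- def cantors_diag(n = 4):
--     pref = []
--     s = 0
--     for k in range(2 * n - 1):
--         pref.append(s)
--         s += n - abs(n - 1 - k)
--     return [[pref[i + j] + 1 + min(i + j, n - 1) - (i if (i + j) % 2 == 0 else j)
--              for j in range(n)]
--             for i in range(n)]
-- ===== Notes on version B (the rewrite author's own statement) =====
-- stated objective: simpler
-- what changed: B replaces A's per-diagonal while-loop walks with a running counter by a direct per-cell closed-form assignment: prefix sums of anti-diagonal lengths plus a parity-dependent offset give each cell's value independently.
import Mathlib
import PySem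

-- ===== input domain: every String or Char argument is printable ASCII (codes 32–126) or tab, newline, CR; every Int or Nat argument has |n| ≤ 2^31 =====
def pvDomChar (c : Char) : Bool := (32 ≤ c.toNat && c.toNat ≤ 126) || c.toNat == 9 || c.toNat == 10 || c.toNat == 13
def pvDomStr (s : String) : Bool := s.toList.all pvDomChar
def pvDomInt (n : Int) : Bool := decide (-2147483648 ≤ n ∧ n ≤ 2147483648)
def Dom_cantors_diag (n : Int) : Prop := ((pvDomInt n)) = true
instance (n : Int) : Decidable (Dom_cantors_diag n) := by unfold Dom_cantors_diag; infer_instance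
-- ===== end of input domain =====

-- B fills each cell of the Cantor-diagonal matrix by a direct per-cell formula
-- (prefix sums of anti-diagonal lengths + parity offset) instead of A's while-loop
-- walks along each diagonal; objective: simpler (no stateful counter, no nested while loops).

-- ===== PORT A =====
-- matrix[i][j] = v  (i, j are the Python loop indices, always in range when A assigns)
def pvSetCell (m : List (List Int)) (i j : Int) (v : Int) : List (List Int) :=
  m.set i.toNat ((m.getD i.toNat []).set j.toNat v)

-- 'while i >= 0 and j < n: matrix[i][j] = init; init += 1; i -= 1; j += 1'
def pvWalkEven (n i j init : Int) (m : List (List Int)) : List (List Int) × Int :=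
  if h : 0 ≤ i ∧ j < n then
    pvWalkEven n (i - 1) (j + 1) (init + 1) (pvSetCell m i j init)
  else (m, init)
termination_by (i + 1).toNat
decreasing_by omega

-- 'while j >= 0 and i < n: matrix[i][j] = init; init += 1; i += 1; j -= 1'
def pvWalkOdd (n i j init : Int) (m : List (List Int)) : List (List Int) × Int :=
  if h : 0 ≤ j ∧ i < n then
    pvWalkOdd n (i + 1) (j - 1) (init + 1) (pvSetCell m i j init)
  else (m, init)
termination_by (j + 1).toNat
decreasing_by omega

def cantors_diag (n : Int) : List (List Int) :=
  let matrix := List.replicate n.toNat (List.replicate n.toNat (0 : Int))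
  ((PySem.List.pyRange 0 (2 * n - 1) 1).foldl
    (fun (st : List (List Int) × Int) k =>
      if PySem.Int.mod k 2 = 0 then
        pvWalkEven n (min k (n - 1)) (k - min k (n - 1)) st.2 st.1
      else
        pvWalkOdd n (k - min k (n - 1)) (min k (n - 1)) st.2 st.1)
    (matrix, 1)).1

-- ===== PORT B =====
def cantors_diag_alt (n : Int) : List (List Int) :=
  let pref := ((PySem.List.pyRange 0 (2 * n - 1) 1).foldl
      (fun (st : List Int × Int) k => (st.1 ++ [st.2], st.2 + (n - |n - 1 - k|)))
      ([], 0)).1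
  (PySem.List.pyRange 0 n 1).map (fun i =>
    (PySem.List.pyRange 0 n 1).map (fun j =>
      (PySem.List.pyGet? pref (i + j)).getD 0 + 1 + min (i + j) (n - 1) -
        (if PySem.Int.mod (i + j) 2 = 0 then i else j)))

-- ===== PRECONDITION & SPEC =====
def Spec_cantors_diag (n : Int) (out : List (List Int)) : Prop := out = cantors_diag_alt n
instance (n : Int) (out : List (List Int)) : Decidable (Spec_cantors_diag n out) := by unfold Spec_cantors_diag; infer_instance

-- ===== CLAIM (what is proved, stated in full; the proofs are below) =====
def Claim_equal_cantors_diag : Prop := ∀ (n : Int), Dom_cantors_diag n → Spec_cantors_diag n (cantors_diag n)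

-- ===== LEMMAS AND PROOFS =====

-- an n×n matrix given by an entry function
def pvBuild (N : Nat) (g : Nat → Nat → Int) : List (List Int) :=
  (List.range N).map (fun a => (List.range N).map (fun b => g a b))

-- prefix sums of the anti-diagonal lengths
def pvPref (n : Int) : Nat → Int
  | 0 => 0
  | k + 1 => pvPref n k + (n - |n - 1 - (k : Int)|)

-- the closed-form entry value
def pvF (n : Int) (a b : Nat) : Int :=
  pvPref n (a + b) + 1 + min ((a : Int) + b) (n - 1) -
    (if PySem.Int.mod ((a : Int) + b) 2 = 0 then (a : Int) else (b : Int))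

theorem pvBuild_congr {N : Nat} {g g' : Nat → Nat → Int}
    (h : ∀ a, a < N → ∀ b, b < N → g a b = g' a b) : pvBuild N g = pvBuild N g' := by
  unfold pvBuild
  refine List.map_congr_left (fun a ha => ?_)
  exact List.map_congr_left (fun b hb => h a (List.mem_range.mp ha) b (List.mem_range.mp hb))

theorem pvBuild_zero (N : Nat) :
    List.replicate N (List.replicate N (0 : Int)) = pvBuild N (fun _ _ => 0) := by
  unfold pvBuild
  simp [List.map_const']

theorem pvSetCell_build (N : Nat) (g : Nat → Nat → Int) (i j : Int)
    (hi0 : 0 ≤ i) (hiN : i < (N : Int)) (hj0 : 0 ≤ j) (hjN : j < (N : Int)) (v : Int) :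
    pvSetCell (pvBuild N g) i j v =
      pvBuild N (fun a b => if (a : Int) = i ∧ (b : Int) = j then v else g a b) := by
  have hI : i.toNat < N := by omega
  have hJ : j.toNat < N := by omega
  have hIc : ((i.toNat : Nat) : Int) = i := by omega
  have hJc : ((j.toNat : Nat) : Int) = j := by omega
  unfold pvSetCell pvBuild
  apply List.ext_getElem
  · simp
  · intro a h1 h2
    simp only [List.length_set, List.length_map, List.length_range] at h1
    rw [List.getElem_set]
    have hrow : ((List.map (fun a => List.map (fun b => g a b) (List.range N))
        (List.range N)).getD i.toNat []) = List.map (fun b => g i.toNat b) (List.range N) := by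
      rw [List.getD_eq_getElem _ _ (by simpa using hI)]
      simp
    simp only [hrow]
    simp only [List.getElem_map, List.getElem_range]
    by_cases hca : i.toNat = a
    · subst hca
      rw [if_pos rfl]
      apply List.ext_getElem
      · simp
      · intro b hb1 hb2
        simp only [List.length_set, List.length_map, List.length_range] at hb1
        rw [List.getElem_set]
        simp only [List.getElem_map, List.getElem_range]
        by_cases hcb : j.toNat = b
        · rw [if_pos hcb, if_pos ⟨hIc, by omega⟩]
        · rw [if_neg hcb, if_neg (by omega)]
    · rw [if_neg hca]
      apply List.map_congr_left
      intro b _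
      rw [if_neg (by omega)]

theorem pvWalkEven_build (n : Int) (N : Nat) (hNn : (N : Int) = n) :
    ∀ (fuel : Nat) (i j c : Int) (g : Nat → Nat → Int), fuel = (i + 1).toNat →
      0 ≤ j → i ≤ n - 1 →
    pvWalkEven n i j c (pvBuild N g) =
      (pvBuild N (fun a b =>
        if (a : Int) + b = i + j ∧ (a : Int) ≤ i ∧ (b : Int) < n then c + (i - a) else g a b),
       c + max 0 (min (i + 1) (n - j))) := by
  intro fuel
  induction fuel with
  | zero =>
    intro i j c g hf hj hi
    rw [pvWalkEven, dif_neg (by omega)]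
    simp only [Prod.mk.injEq]
    refine ⟨pvBuild_congr (fun a ha b hb => ?_), by omega⟩
    rw [if_neg (by omega)]
  | succ m ih =>
    intro i j c g hf hj hi
    rw [pvWalkEven]
    by_cases h : 0 ≤ i ∧ j < n
    · obtain ⟨hi0, hjn⟩ := h
      rw [dif_pos ⟨hi0, hjn⟩]
      rw [pvSetCell_build N g i j hi0 (by omega) hj (by omega) c]
      rw [ih (i - 1) (j + 1) (c + 1) _ (by omega) (by omega) (by omega)]
      simp only [Prod.mk.injEq]
      refine ⟨pvBuild_congr (fun a ha b hb => ?_), by omega⟩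
      by_cases h1 : (a : Int) + b = (i - 1) + (j + 1) ∧ (a : Int) ≤ i - 1 ∧ (b : Int) < n
      · rw [if_pos h1, if_pos (by omega)]
        omega
      · rw [if_neg h1]
        by_cases h2 : (a : Int) = i ∧ (b : Int) = j
        · rw [if_pos h2, if_pos (by omega)]
          omega
        · rw [if_neg h2, if_neg (by omega)]
    · rw [dif_neg h]
      simp only [Prod.mk.injEq]
      refine ⟨pvBuild_congr (fun a ha b hb => ?_), by omega⟩
      rw [if_neg (by omega)]

theorem pvWalkOdd_build (n : Int) (N : Nat) (hNn : (N : Int) = n) :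
    ∀ (fuel : Nat) (i j c : Int) (g : Nat → Nat → Int), fuel = (j + 1).toNat →
      0 ≤ i → j ≤ n - 1 →
    pvWalkOdd n i j c (pvBuild N g) =
      (pvBuild N (fun a b =>
        if (a : Int) + b = i + j ∧ (b : Int) ≤ j ∧ (a : Int) < n then c + (j - b) else g a b),
       c + max 0 (min (j + 1) (n - i))) := by
  intro fuel
  induction fuel with
  | zero =>
    intro i j c g hf hi hj
    rw [pvWalkOdd, dif_neg (by omega)]
    simp only [Prod.mk.injEq]
    refine ⟨pvBuild_congr (fun a ha b hb => ?_), by omega⟩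
    rw [if_neg (by omega)]
  | succ m ih =>
    intro i j c g hf hi hj
    rw [pvWalkOdd]
    by_cases h : 0 ≤ j ∧ i < n
    · obtain ⟨hj0, hin⟩ := h
      rw [dif_pos ⟨hj0, hin⟩]
      rw [pvSetCell_build N g i j hi (by omega) hj0 (by omega) c]
      rw [ih (i + 1) (j - 1) (c + 1) _ (by omega) (by omega) (by omega)]
      simp only [Prod.mk.injEq]
      refine ⟨pvBuild_congr (fun a ha b hb => ?_), by omega⟩
      by_cases h1 : (a : Int) + b = (i + 1) + (j - 1) ∧ (b : Int) ≤ j - 1 ∧ (a : Int) < n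
      · rw [if_pos h1, if_pos (by omega)]
        omega
      · rw [if_neg h1]
        by_cases h2 : (a : Int) = i ∧ (b : Int) = j
        · rw [if_pos h2, if_pos (by omega)]
          omega
        · rw [if_neg h2, if_neg (by omega)]
    · rw [dif_neg h]
      simp only [Prod.mk.injEq]
      refine ⟨pvBuild_congr (fun a ha b hb => ?_), by omega⟩
      rw [if_neg (by omega)]

-- the fold over the first K diagonals
theorem pvFold_inv (n : Int) (N : Nat) (hNn : (N : Int) = n) (_hn : 1 ≤ n) :
    ∀ (K : Nat), (K : Int) ≤ 2 * n - 1 →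
    (PySem.List.pyRange 0 (K : Int) 1).foldl
      (fun (st : List (List Int) × Int) k =>
        if PySem.Int.mod k 2 = 0 then
          pvWalkEven n (min k (n - 1)) (k - min k (n - 1)) st.2 st.1
        else
          pvWalkOdd n (k - min k (n - 1)) (min k (n - 1)) st.2 st.1)
      (pvBuild N (fun _ _ => 0), 1) =
    (pvBuild N (fun a b => if (a : Int) + b < K then pvF n a b else 0), 1 + pvPref n K) := by
  intro K
  induction K with
  | zero =>
    intro _
    rw [PySem.List.pyRange_one_eq_nil (by omega)]
    simp only [List.foldl_nil, Prod.mk.injEq]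
    refine ⟨pvBuild_congr (fun a ha b hb => ?_), by simp [pvPref]⟩
    rw [if_neg (by omega)]
  | succ K ih =>
    intro hK1
    have hKle : (K : Int) ≤ 2 * n - 1 := by push_cast at hK1; omega
    have hK2 : (K : Int) ≤ 2 * n - 2 := by push_cast at hK1; omega
    have hc : ((K + 1 : Nat) : Int) = (K : Int) + 1 := by push_cast; ring
    rw [hc, PySem.List.pyRange_one_succ_right (by omega), List.foldl_append, ih hKle]
    simp only [List.foldl_cons, List.foldl_nil]
    have hm : PySem.Int.mod (K : Int) 2 = (K : Int) % 2 :=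
      PySem.Int.mod_eq_emod_of_pos (by norm_num)
    by_cases hpar : (K : Int) % 2 = 0
    · rw [if_pos (by rw [hm]; exact hpar)]
      rw [pvWalkEven_build n N hNn ((min (K : Int) (n - 1)) + 1).toNat _ _ _ _ rfl
        (by omega) (by omega)]
      simp only [Prod.mk.injEq]
      constructor
      · apply pvBuild_congr
        intro a ha b hb
        have han : (a : Int) < n := by omega
        have hbn : (b : Int) < n := by omega
        by_cases hab : (a : Int) + b = K
        · have habn : a + b = K := by omega
          rw [if_pos (by omega), if_pos (by omega)]
          unfold pvF
          rw [habn]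
          rw [if_pos (by rw [show (a : Int) + b = (K : Int) from hab, hm]; exact hpar)]
          omega
        · by_cases hlt : (a : Int) + b < K
          · rw [if_neg (by omega), if_pos (by omega), if_pos (by omega)]
          · rw [if_neg (by omega), if_neg (by omega), if_neg (by omega)]
      · simp only [pvPref]
        rcases abs_cases (n - 1 - (K : Int)) with ⟨h1, h2⟩ | ⟨h1, h2⟩ <;> omega
    · rw [if_neg (by rw [hm]; exact hpar)]
      rw [pvWalkOdd_build n N hNn ((min (K : Int) (n - 1)) + 1).toNat _ _ _ _ rfl
        (by omega) (by omega)]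
      simp only [Prod.mk.injEq]
      constructor
      · apply pvBuild_congr
        intro a ha b hb
        have han : (a : Int) < n := by omega
        have hbn : (b : Int) < n := by omega
        by_cases hab : (a : Int) + b = K
        · have habn : a + b = K := by omega
          rw [if_pos (by omega), if_pos (by omega)]
          unfold pvF
          rw [habn]
          rw [if_neg (by rw [show (a : Int) + b = (K : Int) from hab, hm]; exact hpar)]
          omega
        · by_cases hlt : (a : Int) + b < K
          · rw [if_neg (by omega), if_pos (by omega), if_pos (by omega)]
          · rw [if_neg (by omega), if_neg (by omega), if_neg (by omega)]
      · simp only [pvPref]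
        rcases abs_cases (n - 1 - (K : Int)) with ⟨h1, h2⟩ | ⟨h1, h2⟩ <;> omega

-- B's pref list
theorem pvPrefList (n : Int) : ∀ (K : Nat),
    ((PySem.List.pyRange 0 (K : Int) 1).foldl
      (fun (st : List Int × Int) k => (st.1 ++ [st.2], st.2 + (n - |n - 1 - k|)))
      ([], 0)) =
    ((List.range K).map (fun k => pvPref n k), pvPref n K) := by
  intro K
  induction K with
  | zero =>
    rw [PySem.List.pyRange_one_eq_nil (by omega)]
    simp [pvPref]
  | succ K ih =>
    have hc : ((K + 1 : Nat) : Int) = (K : Int) + 1 := by push_cast; ring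
    rw [hc, PySem.List.pyRange_one_succ_right (by omega), List.foldl_append, ih]
    simp [List.range_succ, pvPref]

-- ===== VERDICT (by name: the statement is the Claim_ definition above) =====
theorem cantors_diag_spec : Claim_equal_cantors_diag := by
  intro n _
  unfold Spec_cantors_diag
  simp only [cantors_diag, cantors_diag_alt]
  by_cases hn : n ≤ 0
  · rw [PySem.List.pyRange_one_eq_nil (show (2 * n - 1 : Int) ≤ 0 by omega),
      PySem.List.pyRange_one_eq_nil hn]
    simp [Int.toNat_of_nonpos hn]
  · replace hn : 1 ≤ n := by omega
    have hNn : ((n.toNat : Nat) : Int) = n := by omega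
    have hK : (((2 * n - 1).toNat : Nat) : Int) = 2 * n - 1 := by omega
    rw [pvBuild_zero]
    rw [show (2 * n - 1 : Int) = (((2 * n - 1).toNat : Nat) : Int) from hK.symm]
    rw [pvFold_inv n n.toNat hNn hn _ (by omega)]
    rw [pvPrefList n ((2 * n - 1).toNat)]
    rw [show (n : Int) = ((n.toNat : Nat) : Int) from hNn.symm,
      PySem.List.pyRange_zero_natCast, List.map_map]
    unfold pvBuild
    apply List.map_congr_left
    intro a ha
    have haN : a < n.toNat := List.mem_range.mp ha
    simp only [Function.comp]
    rw [List.map_map]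
    apply List.map_congr_left
    intro b hb
    have hbN : b < n.toNat := List.mem_range.mp hb
    simp only [Function.comp]
    rw [if_pos (by omega)]
    have hidx : (a : Int) + (b : Int) = ((a + b : Nat) : Int) := by push_cast; ring
    rw [hidx, PySem.List.pyGet?_natCast]
    rw [List.getElem?_map]
    rw [List.getElem?_range (by omega)]
    unfold pvF
    simp only [Option.map_some, Option.getD_some]
    push_cast
    ring
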